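-- pv_equiv track=rewrite | github.com/TakaIshikawa/blueprint | src/blueprint/plan_dependency_metrics.py | _tasks_by_depth
-- ===== SOURCE A (Python) =====
-- from typing import Any
--
-- def _tasks_by_depth(
--     tasks_by_id: dict[str, dict[str, Any]],
--     depths_by_task_id: dict[str, int],
-- ) -> dict[int, list[str]]:
--     tasks_by_depth: dict[int, list[str]] = {}
--     for task_id in tasks_by_id:
--         depth = depths_by_task_id.get(task_id, 0)
--         tasks_by_depth.setdefault(depth, []).append(task_id)
--     return dict(sorted(tasks_by_depth.items()))
-- ===== SOURCE B (Python) =====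
-- from typing import Any
--
--
-- def _tasks_by_depth(
--     tasks_by_id: dict[str, dict[str, Any]],
--     depths_by_task_id: dict[str, int],
-- ) -> dict[int, list[str]]:
--     # Stable-sort all task ids by depth once, then cut the sorted list into
--     # consecutive equal-depth runs; each run becomes one entry of the result.
--     ids = sorted(tasks_by_id, key=lambda t: depths_by_task_id.get(t, 0))
--     out: dict[int, list[str]] = {}
--     i, n = 0, len(ids)
--     while i < n:
--         depth = depths_by_task_id.get(ids[i], 0)
--         j = i + 1
--         while j < n and depths_by_task_id.get(ids[j], 0) == depth:
--             j += 1
--         out[depth] = ids[i:j]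
--         i = j
--     return out
-- ===== Notes on version B (the rewrite author's own statement) =====
-- stated objective: alternative
-- what changed: A groups ids into a dict keyed by depth and then sorts the dict's items; B stable-sorts all ids by depth once and cuts the sorted list into consecutive equal-depth runs, relying on sort stability to keep insertion order within each depth.
import Mathlib
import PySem

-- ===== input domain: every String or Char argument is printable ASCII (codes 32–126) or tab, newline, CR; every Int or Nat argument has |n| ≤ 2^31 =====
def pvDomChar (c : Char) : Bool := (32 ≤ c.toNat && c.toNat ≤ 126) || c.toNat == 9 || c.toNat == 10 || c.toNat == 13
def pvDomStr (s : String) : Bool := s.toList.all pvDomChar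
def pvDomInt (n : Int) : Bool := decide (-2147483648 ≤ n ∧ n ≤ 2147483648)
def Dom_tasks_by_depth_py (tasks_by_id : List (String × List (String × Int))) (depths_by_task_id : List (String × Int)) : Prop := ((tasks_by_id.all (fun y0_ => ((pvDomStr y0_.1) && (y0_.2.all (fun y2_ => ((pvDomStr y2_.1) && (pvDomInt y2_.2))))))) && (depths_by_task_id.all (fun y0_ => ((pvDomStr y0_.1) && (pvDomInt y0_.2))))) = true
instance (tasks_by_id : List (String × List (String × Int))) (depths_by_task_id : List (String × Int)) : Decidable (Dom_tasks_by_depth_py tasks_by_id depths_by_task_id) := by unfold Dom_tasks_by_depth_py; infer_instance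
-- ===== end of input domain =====

-- B replaces A's group-into-a-dict-then-sort-the-keys with one stable sort of all ids by depth
-- followed by a scan cutting the sorted list into consecutive equal-depth runs (objective: alternative).

-- ===== PORT A =====
-- A builds dict[depth -> list of ids] via setdefault(...).append(...), then returns dict(sorted(items)).
-- sorted(d.items()) compares (int, list) tuples, but dict keys are distinct so Python's tuple
-- comparison only ever reads the first component: ported as a sort keyed on the first component.
def tasks_by_depth_py (tasks_by_id : List (String × List (String × Int))) (depths_by_task_id : List (String × Int)) : List (Int × List String) :=
  let depth : String → Int := fun t => (PySem.Dict.mk depths_by_task_id).getD t 0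
  let grouped : PySem.Dict Int (List String) :=
    (tasks_by_id.map (fun p => p.1)).foldl
      (fun d tid => d.modify (depth tid) [] (fun v => v ++ [tid])) PySem.Dict.empty
  PySem.List.sorted grouped.items (fun p => p.1) false

-- ===== PORT B =====
-- the inner while-loops of Source B: cut the (sorted) id list into consecutive equal-depth runs
def pvRuns (dep : String → Int) : List String → List (Int × List String)
  | [] => []
  | t :: rest =>
      (dep t, t :: rest.takeWhile (fun x => dep x == dep t)) ::
        pvRuns dep (rest.dropWhile (fun x => dep x == dep t))
termination_by l => l.length
decreasing_by
  have := List.length_dropWhile_le (fun x => dep x == dep t) rest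
  simp only [List.length_cons]
  omega

def tasks_by_depth_py_alt (tasks_by_id : List (String × List (String × Int))) (depths_by_task_id : List (String × Int)) : List (Int × List String) :=
  let depth : String → Int := fun t => (PySem.Dict.mk depths_by_task_id).getD t 0
  pvRuns depth (PySem.List.sorted (tasks_by_id.map (fun p => p.1)) depth false)

-- ===== PRECONDITION & SPEC =====
def Spec_tasks_by_depth_py (tasks_by_id : List (String × List (String × Int))) (depths_by_task_id : List (String × Int)) (out : List (Int × List String)) : Prop := out = tasks_by_depth_py_alt tasks_by_id depths_by_task_id
instance (tasks_by_id : List (String × List (String × Int))) (depths_by_task_id : List (String × Int)) (out : List (Int × List String)) : Decidable (Spec_tasks_by_depth_py tasks_by_id depths_by_task_id out) := by unfold Spec_tasks_by_depth_py; infer_instance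

-- ===== CLAIM (what is proved, stated in full; the proofs are below) =====
def Claim_equal_tasks_by_depth_py : Prop := ∀ (tasks_by_id : List (String × List (String × Int))) (depths_by_task_id : List (String × Int)), Dom_tasks_by_depth_py tasks_by_id depths_by_task_id → Spec_tasks_by_depth_py tasks_by_id depths_by_task_id (tasks_by_depth_py tasks_by_id depths_by_task_id)

-- ===== LEMMAS AND PROOFS =====

-- insertBy with a strict `before` keeps the accumulator sorted
theorem pv_insertBy_pairwise {α : Type} (key : α → Int) (x : α) (acc : List α)
    (h : acc.Pairwise (fun a b => key a ≤ key b)) :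
    (PySem.List.insertBy (fun a b => decide (key a < key b)) x acc).Pairwise
      (fun a b => key a ≤ key b) := by
  induction acc with
  | nil => simp [PySem.List.insertBy]
  | cons y ys ih =>
    rcases List.pairwise_cons.mp h with ⟨hy, hys⟩
    by_cases hb : key x < key y
    · simp only [PySem.List.insertBy, hb, decide_true, if_true]
      refine List.pairwise_cons.mpr ⟨?_, h⟩
      intro z hz
      rcases List.mem_cons.mp hz with rfl | hz
      · exact le_of_lt hb
      · exact le_trans (le_of_lt hb) (hy z hz)
    · simp only [PySem.List.insertBy, hb, decide_false, Bool.false_eq_true, if_false]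
      refine List.pairwise_cons.mpr ⟨?_, ih hys⟩
      intro z hz
      rcases (PySem.List.mem_insertBy _ _ _ _).mp hz with rfl | hz
      · exact le_of_not_gt hb
      · exact hy z hz

-- stability of one insertion: an inserted element lands after every equal-key element
theorem pv_insertBy_filter {α : Type} (key : α → Int) (c : Int) (x : α) (acc : List α)
    (h : acc.Pairwise (fun a b => key a ≤ key b)) :
    (PySem.List.insertBy (fun a b => decide (key a < key b)) x acc).filter
        (fun a => key a == c)
      = if key x == c then acc.filter (fun a => key a == c) ++ [x]
        else acc.filter (fun a => key a == c) := by
  induction acc with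
  | nil => by_cases hc : key x == c <;> simp [PySem.List.insertBy, List.filter, hc]
  | cons y ys ih =>
    rcases List.pairwise_cons.mp h with ⟨hy, hys⟩
    by_cases hb : key x < key y
    · simp only [PySem.List.insertBy, hb, decide_true, if_true]
      by_cases hc : key x == c
      · have hnil : (y :: ys).filter (fun a => key a == c) = [] := by
          apply List.filter_eq_nil_iff.mpr
          intro z hz
          have hzc : key x < key z := by
            rcases List.mem_cons.mp hz with rfl | hz
            · exact hb
            · exact lt_of_lt_of_le hb (hy z hz)
          simp only [beq_iff_eq]
          have : key x = c := by simpa using hc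
          omega
        simp [hc, hnil]
      · simp [List.filter_cons, hc]
    · simp only [PySem.List.insertBy, hb, decide_false, Bool.false_eq_true, if_false]
      by_cases hyc : key y == c <;> by_cases hc : key x == c <;>
        simp [hyc, hc, ih hys]

-- stability of the whole sort: filtering one key class commutes with sorting
theorem pv_sorted_filter {α : Type} (key : α → Int) (c : Int) (xs : List α) :
    (PySem.List.sorted xs key false).filter (fun a => key a == c)
      = xs.filter (fun a => key a == c) := by
  rw [PySem.List.sorted_eq_foldl_insertBy]
  have aux : ∀ (ys : List α) (acc : List α), acc.Pairwise (fun a b => key a ≤ key b) →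
      (ys.foldl (fun acc x => PySem.List.insertBy (fun a b => decide (key a < key b)) x acc)
          acc).filter (fun a => key a == c)
        = acc.filter (fun a => key a == c) ++ ys.filter (fun a => key a == c) := by
    intro ys
    induction ys with
    | nil => intro acc _; simp
    | cons x ys ih =>
      intro acc hacc
      rw [List.foldl_cons, ih _ (pv_insertBy_pairwise key x acc hacc),
        pv_insertBy_filter key c x acc hacc]
      by_cases hc : key x == c <;> simp [hc]
  simpa using aux xs [] List.Pairwise.nil

-- PySem.Set.ofList / dedup is a sublist of its input
theorem pv_foldl_add_sublist {α : Type} [BEq α] (xs s : List α) :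
    List.Sublist (List.foldl PySem.Set.add s xs) (s ++ xs) := by
  induction xs generalizing s with
  | nil => simp
  | cons x xs ih =>
    rw [List.foldl_cons]
    refine (ih (PySem.Set.add s x)).trans ?_
    by_cases hc : s.contains x
    · simp only [PySem.Set.add, PySem.Set.contains, hc, if_true]
      exact (List.append_sublist_append_left s).mpr (List.sublist_cons_self x xs)
    · simp only [PySem.Set.add, PySem.Set.contains, hc, Bool.false_eq_true, if_false,
        List.append_assoc, List.singleton_append]
      exact List.Sublist.refl _

theorem pv_dedup_sublist {α : Type} [BEq α] (xs : List α) :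
    List.Sublist (PySem.List.dedup xs) xs := by
  have := pv_foldl_add_sublist xs []
  simpa [PySem.List.dedup_eq_ofList, PySem.Set.ofList_eq_foldl] using this

theorem pv_dedup_pairwise_lt (l : List Int) (h : l.Pairwise (· ≤ ·)) :
    (PySem.List.dedup l).Pairwise (· < ·) := by
  have hle : (PySem.List.dedup l).Pairwise (· ≤ ·) := h.sublist (pv_dedup_sublist l)
  have hne : (PySem.List.dedup l).Pairwise (· ≠ ·) := PySem.List.nodup_dedup l
  exact (hle.and hne).imp (fun h => lt_of_le_of_ne h.1 h.2)

-- folding Set.add over elements already present changes nothing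
theorem pv_foldl_add_of_contains {α : Type} [BEq α] [LawfulBEq α] (xs s : List α)
    (h : ∀ x ∈ xs, x ∈ s) : List.foldl PySem.Set.add s xs = s := by
  induction xs with
  | nil => rfl
  | cons x xs ih =>
    have hx : s.contains x := List.elem_eq_true_of_mem (h x (List.mem_cons_self))
    rw [List.foldl_cons]
    simp only [PySem.Set.add, PySem.Set.contains, hx, if_true]
    exact ih (fun z hz => h z (List.mem_cons_of_mem x hz))

-- a head element absent from the rest stays in front through the fold
theorem pv_foldl_add_cons {α : Type} [BEq α] [LawfulBEq α] (xs s : List α) (d : α)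
    (h : d ∉ xs) : List.foldl PySem.Set.add (d :: s) xs = d :: List.foldl PySem.Set.add s xs := by
  induction xs generalizing s with
  | nil => rfl
  | cons x xs ih =>
    have hxd : (x == d) = false := by
      simp only [beq_eq_false_iff_ne, ne_eq]
      intro hEq; exact h (hEq ▸ List.mem_cons_self)
    have hrest : d ∉ xs := fun hz => h (List.mem_cons_of_mem x hz)
    simp only [List.foldl_cons, PySem.Set.add, PySem.Set.contains, List.elem_cons, hxd]
    by_cases hc : s.elem x
    · simp only [hc, if_true]
      exact ih s hrest
    · simp only [hc, Bool.false_eq_true, if_false, List.cons_append]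
      exact ih (s ++ [x]) hrest

-- a dict with distinct keys is its key list paired with its lookups
theorem pv_items_eq_keys_map {κ ν : Type} [BEq κ] [LawfulBEq κ] (d : PySem.Dict κ ν) (v0 : ν)
    (h : d.keys.Nodup) : d.items = d.keys.map (fun k => (k, d.getD k v0)) := by
  have hstep : d.items.map (fun p => (p.1, d.getD p.1 v0)) = d.items := by
    conv_rhs => rw [← List.map_id d.items]
    apply List.map_congr_left
    intro p hp
    have := PySem.Dict.getD_of_mem_items d (k := p.1) (v := p.2) (by simpa using hp) h v0
    simp [this]
  calc d.items = d.items.map (fun p => (p.1, d.getD p.1 v0)) := hstep.symm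
    _ = (d.items.map (fun p => p.1)).map (fun k => (k, d.getD k v0)) := by
        rw [List.map_map]; rfl
    _ = d.keys.map (fun k => (k, d.getD k v0)) := by rfl

-- characterization of A's grouping fold
theorem pv_grouped_items (ks : List String) (dep : String → Int) :
    (ks.foldl (fun d tid => d.modify (dep tid) [] (fun v => v ++ [tid]))
        (PySem.Dict.empty : PySem.Dict Int (List String))).items
      = (PySem.Set.ofList (ks.map dep)).map
          (fun c => (c, ks.filter (fun t => dep t == c))) := by
  have hkeys : (ks.foldl (fun d tid => d.modify (dep tid) [] (fun v => v ++ [tid]))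
        (PySem.Dict.empty : PySem.Dict Int (List String))).keys
      = PySem.Set.ofList (ks.map dep) := by
    rw [PySem.Dict.keys_foldl_modify_key ks dep [] (fun _ tid => (fun v => v ++ [tid]))]
    simp [PySem.Dict.keys_empty, PySem.Set.update, PySem.Set.ofList_eq_foldl]
  have hnodup : (ks.foldl (fun d tid => d.modify (dep tid) [] (fun v => v ++ [tid]))
        (PySem.Dict.empty : PySem.Dict Int (List String))).keys.Nodup := by
    apply PySem.Dict.nodup_keys_foldl_modify_key ks dep [] (fun _ tid => (fun v => v ++ [tid]))
    simp [PySem.Dict.keys_empty]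
  have hget : ∀ c, (ks.foldl (fun d tid => d.modify (dep tid) [] (fun v => v ++ [tid]))
        (PySem.Dict.empty : PySem.Dict Int (List String))).getD c []
      = ks.filter (fun t => dep t == c) := by
    intro c
    have hfold : ks.foldl (fun d tid => d.modify (dep tid) [] (fun v => v ++ [tid]))
          (PySem.Dict.empty : PySem.Dict Int (List String))
        = (ks.map (fun t => (dep t, t))).foldl
            (fun d p => d.modify p.1 [] (fun v => v ++ [p.2])) PySem.Dict.empty := by
      rw [List.foldl_map]
    rw [hfold, PySem.Dict.getD_foldl_modify_append]
    simp [List.filter_map, Function.comp_def]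
  rw [pv_items_eq_keys_map _ [] hnodup, hkeys]
  apply List.map_congr_left
  intro c _
  rw [hget c]

-- characterization of B's run-cutting scan on a list sorted by dep
theorem pv_pvRuns_eq (dep : String → Int) (l : List String)
    (h : l.Pairwise (fun a b => dep a ≤ dep b)) :
    pvRuns dep l
      = (PySem.List.dedup (l.map dep)).map
          (fun c => (c, l.filter (fun t => dep t == c))) := by
  induction l using pvRuns.induct dep with
  | case1 => simp [pvRuns, PySem.List.dedup_eq_ofList, PySem.Set.ofList]
  | case2 t rest ih =>
    rcases List.pairwise_cons.mp h with ⟨hy, hrest⟩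
    have hpw' : (rest.dropWhile (fun x => dep x == dep t)).Pairwise
        (fun a b => dep a ≤ dep b) := hrest.sublist (List.dropWhile_sublist _)
    have hsplit := List.takeWhile_append_dropWhile
      (p := fun x => dep x == dep t) (l := rest)
    have hrun : ∀ z ∈ rest.takeWhile (fun x => dep x == dep t), dep z = dep t := by
      intro z hz
      simpa using List.mem_takeWhile_imp hz
    have hrest' : ∀ z ∈ rest.dropWhile (fun x => dep x == dep t), dep t < dep z := by
      intro z hz
      rcases hd : rest.dropWhile (fun x => dep x == dep t) with _ | ⟨z0, zs⟩
      · rw [hd] at hz; simp at hz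
      · have hz0 : dep z0 ≠ dep t := by
          have := List.head?_dropWhile_not (fun x => dep x == dep t) rest
          rw [hd] at this
          simpa using this
        have hz0mem : z0 ∈ rest := (List.dropWhile_sublist _).mem (hd ▸ List.mem_cons_self)
        have hz0t : dep t < dep z0 := lt_of_le_of_ne (hy z0 hz0mem) (Ne.symm hz0)
        rw [hd] at hz
        rcases List.mem_cons.mp hz with rfl | hz
        · exact hz0t
        · have hpz : dep z0 ≤ dep z := by
            have := List.pairwise_cons.mp (hd ▸ hpw')
            exact this.1 z hz
          omega
    -- left side: one unfolding of pvRuns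
    rw [pvRuns]
    -- right side, index list: dedup ((t :: rest).map dep) = dep t :: dedup (rest'.map dep)
    have hdedup : PySem.List.dedup ((t :: rest).map dep)
        = dep t :: PySem.List.dedup ((rest.dropWhile (fun x => dep x == dep t)).map dep) := by
      have hmap : (t :: rest).map dep
          = dep t :: ((rest.takeWhile (fun x => dep x == dep t)).map dep
              ++ (rest.dropWhile (fun x => dep x == dep t)).map dep) := by
        rw [← List.map_append, hsplit]; rfl
      rw [hmap]
      simp only [PySem.List.dedup_eq_ofList, PySem.Set.ofList_eq_foldl, List.foldl_cons,
        List.foldl_append]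
      have hadd0 : PySem.Set.add ([] : List Int) (dep t) = [dep t] := rfl
      rw [hadd0]
      rw [pv_foldl_add_of_contains ((rest.takeWhile (fun x => dep x == dep t)).map dep)
        [dep t] (by
        intro z hz
        rcases List.mem_map.mp hz with ⟨w, hw, rfl⟩
        simp [hrun w hw])]
      rw [pv_foldl_add_cons ((rest.dropWhile (fun x => dep x == dep t)).map dep) [] (dep t) (by
        intro hz
        rcases List.mem_map.mp hz with ⟨w, hw, hwt⟩
        have := hrest' w hw
        omega)]
    rw [hdedup, List.map_cons]
    congr 1
    · -- head pair
      have hfilter : (t :: rest).filter (fun z => dep z == dep t)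
          = t :: rest.takeWhile (fun x => dep x == dep t) := by
        rw [List.filter_cons]
        simp only [beq_self_eq_true, if_true]
        congr 1
        conv_lhs => rw [← hsplit]
        rw [List.filter_append]
        rw [List.filter_eq_self.mpr (by intro z hz; simp [hrun z hz]),
          List.filter_eq_nil_iff.mpr (by
            intro z hz
            have := hrest' z hz
            simp only [beq_iff_eq]
            omega)]
        simp
      simp [hfilter]
    · -- tail: filters over (t :: rest) restrict to rest' for every c in the tail index list
      rw [ih hpw']
      apply List.map_congr_left
      intro c hc
      have hcmem : c ∈ (rest.dropWhile (fun x => dep x == dep t)).map dep :=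
        (PySem.List.mem_dedup _ _).mp hc
      rcases List.mem_map.mp hcmem with ⟨w, hw, rfl⟩
      have hct : dep t < dep w := hrest' w hw
      have hfilter : (t :: rest).filter (fun z => dep z == dep w)
          = (rest.dropWhile (fun x => dep x == dep t)).filter (fun z => dep z == dep w) := by
        rw [List.filter_cons]
        have hne : (dep t == dep w) = false := by simp; omega
        rw [hne]
        simp only [Bool.false_eq_true, if_false]
        conv_lhs => rw [← hsplit]
        rw [List.filter_append, List.filter_eq_nil_iff.mpr (by
          intro z hz
          have := hrun z hz
          simp only [beq_iff_eq]
          omega)]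
        simp
      rw [hfilter]

-- ===== VERDICT (by name: the statement is the Claim_ definition above) =====
theorem tasks_by_depth_py_spec : Claim_equal_tasks_by_depth_py := by
  intro tasks_by_id depths_by_task_id _
  unfold Spec_tasks_by_depth_py tasks_by_depth_py tasks_by_depth_py_alt
  simp only []
  rw [pv_grouped_items, pv_pvRuns_eq _ _ (PySem.List.sorted_pairwise _ _)]
  simp only [pv_sorted_filter]
  apply PySem.List.sorted_eq_of_perm_of_pairwise_lt
  · apply List.Perm.map
    apply (List.perm_ext_iff_of_nodup (PySem.List.nodup_dedup _) (PySem.Set.nodup_ofList _)).mpr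
    intro c
    rw [PySem.List.mem_dedup, PySem.Set.mem_ofList]
    constructor
    · intro hc
      rcases List.mem_map.mp hc with ⟨w, hw, rfl⟩
      exact List.mem_map.mpr ⟨w, (PySem.List.mem_sorted _ _ _ _).mp hw, rfl⟩
    · intro hc
      rcases List.mem_map.mp hc with ⟨w, hw, rfl⟩
      exact List.mem_map.mpr ⟨w, (PySem.List.mem_sorted _ _ _ _).mpr hw, rfl⟩
  · rw [List.pairwise_map]
    have hpl : ((PySem.List.sorted (tasks_by_id.map (fun p => p.1))
        (fun t => (PySem.Dict.mk depths_by_task_id).getD t 0) false).map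
        (fun t => (PySem.Dict.mk depths_by_task_id).getD t 0)).Pairwise (· ≤ ·) := by
      rw [List.pairwise_map]
      exact PySem.List.sorted_pairwise _ _
    exact (pv_dedup_pairwise_lt _ hpl).imp (fun h => h)
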